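-- pv_equiv track=rewrite | github.com/Thernn88/SAPPHYRE | phymmr/merge_overlap.py | calculate_split
-- ===== SOURCE A (Python) =====
-- from typing import Union, Literal
--
-- def get_start_end(sequence: str) -> tuple:
--     """
--     Returns index of first and last none dash character in sequence.
--     """
--     start = None
--     end = None
--     for i, character in enumerate(sequence):
--         if character != "-":
--             start = i
--             break
--     for i in range(len(sequence) - 1, -1, -1):
--         if sequence[i] != "-":
--             end = i
--             break
--     return start, end
--
-- def find_overlap(tuple_a: tuple, tuple_b: tuple) -> Union[tuple, None]:
--     """
--     Takes two start/end pairs and returns the overlap.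
--     """
--     start = max(tuple_a[0], tuple_b[0])
--     end = min(tuple_a[1], tuple_b[1])
--     if end - start < 0:
--         return None
--     return start, end
--
-- def calculate_split(sequence_a: str, sequence_b: str, comparison_sequence: str) -> int:
--     """
--     Iterates over each position in the overlap range of sequence A and sequence B and
--     creates a frankenstein sequence of sequence A + Sequence B joined at each
--     position in the overlap.
--
--     Final split position = pos in overlap with the highest score.
--
--     Score is determined by the amount of characters that are the same between each
--     position in the frankenstein sequence and the comparison sequence.
--     """
--     pair_a = get_start_end(sequence_a)
--     pair_b = get_start_end(sequence_b)
--
--     overlap_start, overlap_end = find_overlap(pair_a, pair_b)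
--
--     sequence_a_overlap = sequence_a[overlap_start : overlap_end + 1]
--     sequence_b_overlap = sequence_b[overlap_start : overlap_end + 1]
--     comparison_overlap = comparison_sequence[overlap_start : overlap_end + 1]
--
--     base_score = 0
--     highest_scoring_pos = 0
--
--     for i, character in enumerate(sequence_b_overlap):
--         if character == comparison_overlap[i]:
--             base_score += 1
--     highest_score = base_score
--
--     for i, character_a in enumerate(sequence_a_overlap):
--         if sequence_b_overlap[i] == comparison_overlap[i]:
--             base_score -= 1
--         if character_a == comparison_overlap[i]:
--             base_score += 1
--         if base_score >= highest_score:
--             highest_score = base_score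
--             highest_scoring_pos = i
--     return highest_scoring_pos + overlap_start
-- ===== SOURCE B (Python) =====
-- def calculate_split(sequence_a: str, sequence_b: str, comparison_sequence: str) -> int:
--     """
--     Best split position via a suffix-match table and an explicit scores list:
--     score(i) = (matches of A vs C on overlap[:i+1]) + (matches of B vs C on overlap[i+1:]);
--     the answer is the LAST index attaining the maximum score, or 0 if every score is
--     below the no-split baseline (all of B), plus the overlap start.
--     """
--     start_a = len(sequence_a) - len(sequence_a.lstrip("-"))
--     end_a = len(sequence_a.rstrip("-")) - 1
--     start_b = len(sequence_b) - len(sequence_b.lstrip("-"))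
--     end_b = len(sequence_b.rstrip("-")) - 1
--
--     overlap_start = max(start_a, start_b)
--     overlap_end = min(end_a, end_b)
--
--     a = sequence_a[overlap_start : overlap_end + 1]
--     b = sequence_b[overlap_start : overlap_end + 1]
--     c = comparison_sequence[overlap_start : overlap_end + 1]
--
--     suffix = [0]
--     run = 0
--     for x, y in zip(b[::-1], c[::-1]):
--         run += x == y
--         suffix.append(run)
--     suffix.reverse()
--     total_b = suffix[0]
--
--     scores = []
--     running = 0
--     for (x, y), s in zip(zip(a, c), suffix[1:]):
--         running += x == y
--         scores.append(running + s)
--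
--     best_score = max(scores)
--     if best_score < total_b:
--         return overlap_start
--     return len(scores) - 1 - scores[::-1].index(best_score) + overlap_start
-- ===== Notes on version B (the rewrite author's own statement) =====
-- stated objective: alternative
-- what changed: Replaces A's break-loop scans and single running-score pass (decrement on a B-match, increment on an A-match, best tracked in-loop) by lstrip/rstrip-based bounds, a suffix-match table built back-to-front, an explicit scores list score(i)=prefixA(i+1)+suffixB(i+1), and max()+reversed .index() to pick the last argmax against the no-split baseline.
import Mathlib
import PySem

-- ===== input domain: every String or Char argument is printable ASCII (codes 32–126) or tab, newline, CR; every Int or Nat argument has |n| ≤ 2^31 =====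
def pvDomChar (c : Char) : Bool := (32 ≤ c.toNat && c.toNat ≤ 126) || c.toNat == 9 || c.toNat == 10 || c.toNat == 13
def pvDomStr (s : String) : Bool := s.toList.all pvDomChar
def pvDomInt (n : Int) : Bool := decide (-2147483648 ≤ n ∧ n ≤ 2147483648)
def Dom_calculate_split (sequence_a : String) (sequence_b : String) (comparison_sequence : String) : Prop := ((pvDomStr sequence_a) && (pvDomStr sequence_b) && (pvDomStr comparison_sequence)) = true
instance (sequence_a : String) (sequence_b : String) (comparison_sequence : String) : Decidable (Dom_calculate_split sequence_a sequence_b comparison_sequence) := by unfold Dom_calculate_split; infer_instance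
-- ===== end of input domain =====

-- B replaces A's break-loop scans and single running-score pass by lstrip/rstrip-based
-- bounds, a suffix-match table built back-to-front, an explicit scores list and
-- max() + reversed .index() to select the last best split; same O(n) cost, different
-- algorithm/decomposition. Equal return values proved on Pre_ (exactly where A returns);
-- no argument is mutated.

-- ===== PORT A =====
-- get_start_end: first loop breaks at the first non-dash, second walks range(len-1,-1,-1)
def pvGetStartEnd (sequence : String) : Option Int × Option Int :=
  let cs := sequence.toList
  let start := ((PySem.List.enumerate cs).find? (fun p => p.2 != '-')).map (fun p => p.1)
  let stop := (PySem.List.pyRange (PySem.List.len cs - 1) (-1) (-1)).find?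
      (fun i => PySem.List.pyGetD cs i '-' != '-')  -- index always in range, default unreachable
  (start, stop)

def pvFindOverlap (tuple_a : Int × Int) (tuple_b : Int × Int) : Option (Int × Int) :=
  let start := max tuple_a.1 tuple_b.1
  let stop := min tuple_a.2 tuple_b.2
  if stop - start < 0 then none else some (start, stop)

def calculate_split (sequence_a : String) (sequence_b : String) (comparison_sequence : String) : Int :=
  match pvGetStartEnd sequence_a, pvGetStartEnd sequence_b with
  | (some sa, some ea), (some sb, some eb) =>
    match pvFindOverlap (sa, ea) (sb, eb) with
    | some (os, oe) =>
      let aov := PySem.List.slice sequence_a.toList (some os) (some (oe + 1))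
      let bov := PySem.List.slice sequence_b.toList (some os) (some (oe + 1))
      let cov := PySem.List.slice comparison_sequence.toList (some os) (some (oe + 1))
      -- Python raises IndexError when the comparison overlap is too short; excluded by
      -- Pre_, there the pyGetD default is unreachable
      let base := (PySem.List.enumerate bov).foldl
        (fun acc p => if p.2 == PySem.List.pyGetD cov p.1 ' ' then acc + 1 else acc) (0 : Int)
      let st := (PySem.List.enumerate aov).foldl
        (fun (st : Int × Int × Int) p =>
          let b1 := if PySem.List.pyGetD bov p.1 ' ' == PySem.List.pyGetD cov p.1 ' ' then st.1 - 1 else st.1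
          let b2 := if p.2 == PySem.List.pyGetD cov p.1 ' ' then b1 + 1 else b1
          if b2 ≥ st.2.1 then (b2, b2, p.1) else (b2, st.2.1, st.2.2))
        (base, base, 0)
      st.2.2 + os
    | none => 0      -- Python: TypeError (unpacking None); excluded by Pre_
  | _, _ => 0        -- Python: max/min on None inside find_overlap raises TypeError; excluded by Pre_

-- ===== PORT B =====
def calculate_split_alt (sequence_a : String) (sequence_b : String) (comparison_sequence : String) : Int :=
  -- len(s) - len(s.lstrip("-")) and len(s.rstrip("-")) - 1: lstrip/rstrip with "-" ported
  -- by hand as dropWhile on the char list (exact: they strip exactly leading/trailing '-')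
  let start_a : Int := PySem.List.len sequence_a.toList - PySem.List.len (sequence_a.toList.dropWhile (· == '-'))
  let end_a : Int := PySem.List.len ((sequence_a.toList.reverse.dropWhile (· == '-')).reverse) - 1
  let start_b : Int := PySem.List.len sequence_b.toList - PySem.List.len (sequence_b.toList.dropWhile (· == '-'))
  let end_b : Int := PySem.List.len ((sequence_b.toList.reverse.dropWhile (· == '-')).reverse) - 1
  let overlap_start := max start_a start_b
  let overlap_end := min end_a end_b
  let a := PySem.List.slice sequence_a.toList (some overlap_start) (some (overlap_end + 1))
  let b := PySem.List.slice sequence_b.toList (some overlap_start) (some (overlap_end + 1))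
  let c := PySem.List.slice comparison_sequence.toList (some overlap_start) (some (overlap_end + 1))
  -- b[::-1] / c[::-1] ported as reverse (PySem.List.slice?_none_none_neg_one)
  let suffix0 := (b.reverse.zip c.reverse).foldl
      (fun (st : List Int × Int) p =>
        let run := st.2 + (if p.1 == p.2 then 1 else 0)
        (st.1 ++ [run], run)) ([0], 0)
  let suffix := suffix0.1.reverse           -- suffix.reverse() (in place in Python)
  let total_b := PySem.List.pyGetD suffix 0 0   -- suffix[0]; list nonempty, default unreachable
  let scores := (((a.zip c).zip (PySem.List.slice suffix (some 1) none)).foldl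
      (fun (st : List Int × Int) p =>
        let running := st.2 + (if p.1.1 == p.1.2 then 1 else 0)
        (st.1 ++ [running + p.2], running)) ([], 0)).1
  match PySem.List.max? scores (fun x => x) with
  | none => 0        -- Python: max([]) raises ValueError (empty overlap); outside Pre_
  | some best_score =>
    if best_score < total_b then overlap_start
    else
      match PySem.List.index? scores.reverse best_score with
      | some k => PySem.List.len scores - 1 - (k : Int) + overlap_start
      | none => 0    -- unreachable: best_score is a member of scores

-- ===== PRECONDITION & SPEC =====
-- first non-dash index (= length when all dashes) and last non-dash index (meaningful only
-- when some non-dash exists)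
def pvFND (cs : List Char) : Nat := (cs.takeWhile (· == '-')).length
def pvLND (cs : List Char) : Nat := cs.length - 1 - (cs.reverse.takeWhile (· == '-')).length

-- Pre_ = exactly the inputs where Python A returns: each sequence has a non-dash character
-- (else max(None, _) raises TypeError), the spans overlap (else unpacking None raises
-- TypeError), and the comparison sequence covers the whole overlap (else IndexError).
def Pre_calculate_split (sequence_a : String) (sequence_b : String) (comparison_sequence : String) : Prop :=
  sequence_a.toList.any (· != '-') = true ∧
  sequence_b.toList.any (· != '-') = true ∧
  max (pvFND sequence_a.toList) (pvFND sequence_b.toList) ≤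
    min (pvLND sequence_a.toList) (pvLND sequence_b.toList) ∧
  min (pvLND sequence_a.toList) (pvLND sequence_b.toList) < comparison_sequence.toList.length

instance (sequence_a : String) (sequence_b : String) (comparison_sequence : String) : Decidable (Pre_calculate_split sequence_a sequence_b comparison_sequence) := by unfold Pre_calculate_split; infer_instance

def pvWitness_calculate_split : String × String × String := ("x-y", "-zy", "xzy")

def Spec_calculate_split (sequence_a : String) (sequence_b : String) (comparison_sequence : String) (out : Int) : Prop := out = calculate_split_alt sequence_a sequence_b comparison_sequence
instance (sequence_a : String) (sequence_b : String) (comparison_sequence : String) (out : Int) : Decidable (Spec_calculate_split sequence_a sequence_b comparison_sequence out) := by unfold Spec_calculate_split; infer_instance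

-- ===== CLAIM (what is proved, stated in full; the proofs are below) =====
def Claim_equal_calculate_split : Prop := ∀ (sequence_a : String) (sequence_b : String) (comparison_sequence : String), Dom_calculate_split sequence_a sequence_b comparison_sequence → Pre_calculate_split sequence_a sequence_b comparison_sequence → Spec_calculate_split sequence_a sequence_b comparison_sequence (calculate_split sequence_a sequence_b comparison_sequence)

-- ===== LEMMAS AND PROOFS =====

theorem pv_find?_congr {α : Type} (l : List α) (f g : α → Bool)
    (h : ∀ x ∈ l, f x = g x) : l.find? f = l.find? g := by
  induction l with
  | nil => rfl
  | cons x t ih =>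
    have hx := h x (by simp)
    by_cases hfx : f x = true
    · rw [List.find?_cons_of_pos hfx, List.find?_cons_of_pos (hx ▸ hfx)]
    · rw [List.find?_cons_of_neg hfx, List.find?_cons_of_neg (hx ▸ hfx),
        ih (fun y hy => h y (by simp [hy]))]

-- A's forward break-loop finds the first non-dash = takeWhile length
theorem pv_find_first (cs : List Char) (s : Int) (h : cs.any (· != '-') = true) :
    ((PySem.List.enumerate cs s).find? (fun p => p.2 != '-')).map (fun p => p.1)
      = some (s + (pvFND cs : Int)) := by
  induction cs generalizing s with
  | nil => simp at h
  | cons x t ih =>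
    by_cases hx : x = '-'
    · subst hx
      rw [PySem.List.enumerate_cons, List.find?_cons_of_neg (by simp)]
      have ht : t.any (· != '-') = true := by simpa using h
      rw [ih (s+1) ht]
      have hf : pvFND ('-' :: t) = pvFND t + 1 := by simp [pvFND]
      rw [hf]; push_cast; ring_nf
    · rw [PySem.List.enumerate_cons, List.find?_cons_of_pos (by simp [hx])]
      have hf : pvFND (x :: t) = 0 := by simp [pvFND, hx]
      simp [hf]

theorem pv_fnd_lt (cs : List Char) (h : cs.any (· != '-') = true) :
    pvFND cs < cs.length := by
  induction cs with
  | nil => simp at h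
  | cons x t ih =>
    by_cases hx : x = '-'
    · subst hx
      have ht : t.any (· != '-') = true := by simpa using h
      have := ih ht
      simp [pvFND] at *; omega
    · simp [pvFND, hx]

theorem pv_tw_rev_lt (cs : List Char) (h : cs.any (· != '-') = true) :
    (cs.reverse.takeWhile (· == '-')).length < cs.length := by
  have h2 : cs.reverse.any (· != '-') = true := by simpa using h
  have := pv_fnd_lt cs.reverse h2
  simpa [pvFND] using this

-- A's backward break-loop finds the last non-dash
theorem pv_find_last (cs : List Char) (h : cs.any (· != '-') = true) :
    (PySem.List.pyRange ((cs.length : Int) - 1) (-1) (-1)).find?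
        (fun i => PySem.List.pyGetD cs i '-' != '-')
      = some (pvLND cs : Int) := by
  induction cs using List.reverseRecOn with
  | nil => simp at h
  | append_singleton ds x ih =>
    have hlen : ((ds ++ [x]).length : Int) - 1 = (ds.length : Int) := by simp
    rw [hlen, PySem.List.pyRange_neg_one_cons (by omega)]
    have hget : PySem.List.pyGetD (ds ++ [x]) ((ds.length : Nat) : Int) '-' = x := by
      rw [PySem.List.pyGetD_natCast]
      simp [List.getD_eq_getElem?_getD]
    by_cases hx : x = '-'
    · subst hx
      rw [List.find?_cons_of_neg (by simp [hget])]
      have hds : ds.any (· != '-') = true := by simpa using h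
      have hcong : (PySem.List.pyRange ((ds.length : Int) - 1) (-1) (-1)).find?
            (fun i => PySem.List.pyGetD (ds ++ ['-']) i '-' != '-')
          = (PySem.List.pyRange ((ds.length : Int) - 1) (-1) (-1)).find?
            (fun i => PySem.List.pyGetD ds i '-' != '-') := by
        apply pv_find?_congr
        intro i hi
        rw [PySem.List.pyRange_neg_one] at hi
        simp only [List.mem_map, List.mem_range] at hi
        obtain ⟨k, hk, rfl⟩ := hi
        have h0 : (0:Int) ≤ (ds.length : Int) - 1 - k := by omega
        have h1 : ((ds.length : Int) - 1 - k).toNat < ds.length := by omega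
        rw [PySem.List.pyGetD_of_nonneg _ _ h0, PySem.List.pyGetD_of_nonneg _ _ h0]
        congr 1
        rw [List.getD_eq_getElem?_getD, List.getD_eq_getElem?_getD,
          List.getElem?_append_left h1]
      rw [hcong, ih hds]
      have heq : pvLND (ds ++ ['-']) = pvLND ds := by
        simp [pvLND, List.reverse_append]
        omega
      rw [heq]
    · rw [List.find?_cons_of_pos (by simp [hget, hx])]
      have heq : pvLND (ds ++ [x]) = ds.length := by
        simp [pvLND, List.reverse_append, hx]
      rw [heq]

-- per-index match count over the first n positions (the common spec both sides reach)
def pvCnt (X Y : List Char) (n : Nat) : Int :=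
  ((List.range n).countP (fun j => X.getD j ' ' == Y.getD j ' ') : Int)

-- B's suffix-table builder characterised (fold over a Bool list with (list, running) state)
theorem pv_prefix_fold (ms : List Bool) (acc : List Int) (t : Int) :
    ms.foldl (fun (st : List Int × Int) m =>
        let t := st.2 + (if m then 1 else 0); (st.1 ++ [t], t)) (acc, t)
      = (acc ++ (List.range ms.length).map
            (fun k => t + ((ms.take (k+1)).map (fun m => if m then (1:Int) else 0)).sum),
         t + (ms.map (fun m => if m then (1:Int) else 0)).sum) := by
  induction ms generalizing acc t with
  | nil => simp
  | cons m rest ih =>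
    simp only [List.foldl_cons]
    rw [ih]
    simp only [List.length_cons, List.range_succ_eq_map, List.map_cons, List.map_map,
      List.take_succ_cons, List.sum_cons, List.map_nil, List.take_zero, List.sum_nil,
      Prod.mk.injEq]
    refine ⟨?_, by ring⟩
    rw [List.append_assoc]
    congr 1
    simp only [List.singleton_append, Function.comp_def]
    congr 1
    · ring
    · exact List.map_congr_left (fun k _ => by ring)

-- sums of the Bool match list = pvCnt
theorem pv_match_take (X Y : List Char) (n : Nat) (hx : n ≤ X.length) (hy : n ≤ Y.length) :
    ((((X.zip Y).map (fun p => p.1 == p.2)).take n).map (fun m => if m then (1:Int) else 0)).sum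
      = pvCnt X Y n := by
  induction X generalizing Y n with
  | nil =>
    have hn : n = 0 := by simpa using hx
    subst hn; simp [pvCnt]
  | cons x X' ih =>
    cases Y with
    | nil =>
      have hn : n = 0 := by simpa using hy
      subst hn; simp [pvCnt]
    | cons y Y' =>
      cases n with
      | zero => simp [pvCnt]
      | succ k =>
        simp only [List.zip_cons_cons, List.map_cons, List.take_succ_cons, List.sum_cons]
        rw [ih Y' k (by simpa using hx) (by simpa using hy)]
        simp only [pvCnt, List.range_succ_eq_map, List.countP_cons, List.countP_map]
        simp [Function.comp_def]
        split_ifs <;> omega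

-- the running-score loop tracked against an absolute score function
theorem pv_foldl_track (l : List Int) (step sc : Int → Int) :
    ∀ (b h p : Int),
    (∀ pre j post, l = pre ++ j :: post → sc j = b + ((pre ++ [j]).map step).sum) →
    l.foldl (fun (st : Int × Int × Int) j =>
        let b2 := st.1 + step j
        if b2 ≥ st.2.1 then (b2, b2, j) else (b2, st.2.1, st.2.2)) (b, h, p)
      = (b + (l.map step).sum,
         (l.foldl (fun (st : Int × Int) j => if sc j ≥ st.1 then (sc j, j) else st) (h, p)).1,
         (l.foldl (fun (st : Int × Int) j => if sc j ≥ st.1 then (sc j, j) else st) (h, p)).2) := by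
  induction l with
  | nil => intro b h p _; simp
  | cons j t ih =>
    intro b h p hsc
    have hj : sc j = b + step j := by
      have := hsc [] j t rfl
      simpa using this
    have hsc' : ∀ pre j' post, t = pre ++ j' :: post →
        sc j' = (b + step j) + ((pre ++ [j']).map step).sum := by
      intro pre j' post hdec
      have := hsc (j :: pre) j' post (by simp [hdec])
      simpa [add_assoc] using this
    simp only [List.foldl_cons]
    by_cases hge : b + step j ≥ h
    · rw [if_pos hge, if_pos (by rw [hj]; exact hge)]
      rw [ih (b + step j) (b + step j) j hsc']
      simp [hj, add_assoc]
    · rw [if_neg hge, if_neg (by rw [hj]; exact hge)]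
      rw [ih (b + step j) h p hsc']
      simp [add_assoc]

-- step sums = difference of match counts
theorem pv_step_sum (A B C : List Char) (m : Nat) :
    (((List.range m).map (fun k =>
        (if A.getD k ' ' == C.getD k ' ' then (1:Int) else 0)
          - (if B.getD k ' ' == C.getD k ' ' then (1:Int) else 0))).sum)
      = pvCnt A C m - pvCnt B C m := by
  induction m with
  | zero => simp [pvCnt]
  | succ k ih =>
    simp only [List.range_succ, List.map_append, List.sum_append, pvCnt,
      List.countP_append, List.map_cons, List.map_nil, List.sum_cons, List.sum_nil] at *
    push_cast at *
    split_ifs <;> simp_all <;> omega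

def pvBase (B C : List Char) : Int :=
  (PySem.List.enumerate B).foldl
    (fun acc p => if p.2 == PySem.List.pyGetD C p.1 ' ' then acc + 1 else acc) (0 : Int)

-- A's first loop counts the B/C matches
theorem pv_base_eq (B C : List Char) : pvBase B C = pvCnt B C B.length := by
  unfold pvBase
  rw [PySem.List.enumerate_eq_map_pyRange B ' ', List.foldl_map]
  rw [PySem.List.foldl_if_add_one
    (fun j => PySem.List.pyGetD B j ' ' == PySem.List.pyGetD C j ' ')]
  rw [PySem.List.len_eq, PySem.List.pyRange_one, List.countP_map]
  simp [pvCnt, Function.comp_def]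

-- the per-prefix step sums over a python range
theorem pv_range_step (A B C : List Char) (m : Nat) :
    ((PySem.List.pyRange 0 (m:Int) 1).map (fun j =>
      (if PySem.List.pyGetD A j ' ' == PySem.List.pyGetD C j ' ' then (1:Int) else 0)
        - (if PySem.List.pyGetD B j ' ' == PySem.List.pyGetD C j ' ' then (1:Int) else 0))).sum
    = pvCnt A C m - pvCnt B C m := by
  rw [PySem.List.pyRange_one, List.map_map]
  have he : ((m:Int) - 0).toNat = m := by omega
  rw [he]
  have hmap : (List.range m).map ((fun j =>
      (if PySem.List.pyGetD A j ' ' == PySem.List.pyGetD C j ' ' then (1:Int) else 0)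
        - (if PySem.List.pyGetD B j ' ' == PySem.List.pyGetD C j ' ' then (1:Int) else 0))
        ∘ (fun k : Nat => (0:Int) + k))
      = (List.range m).map (fun k =>
      (if A.getD k ' ' == C.getD k ' ' then (1:Int) else 0)
        - (if B.getD k ' ' == C.getD k ' ' then (1:Int) else 0)) := by
    apply List.map_congr_left
    intro k _
    simp [PySem.List.pyGetD_natCast]
  rw [hmap]
  exact pv_step_sum A B C m

-- branch arithmetic of A's inner loop body
theorem pv_step_arith (P Q : Prop) [Decidable P] [Decidable Q] (x : Int) :
    (if P then (if Q then x - 1 else x) + 1 else (if Q then x - 1 else x))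
      = x + ((if P then (1:Int) else 0) - (if Q then (1:Int) else 0)) := by
  by_cases hP : P <;> by_cases hQ : Q <;> (simp [hP, hQ]; try ring)

-- B's scores-list builder characterised
theorem pv_scores_fold (q : List ((Char × Char) × Int)) (acc : List Int) (r : Int) :
    q.foldl (fun (st : List Int × Int) p =>
        let t := st.2 + (if p.1.1 == p.1.2 then 1 else 0); (st.1 ++ [t + p.2], t)) (acc, r)
      = (acc ++ (List.range q.length).map (fun k =>
            (r + ((q.take (k+1)).map (fun p => if p.1.1 == p.1.2 then (1:Int) else 0)).sum)
              + (q.getD k ((' ',' '),0)).2),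
         r + (q.map (fun p => if p.1.1 == p.1.2 then (1:Int) else 0)).sum) := by
  induction q generalizing acc r with
  | nil => simp
  | cons p rest ih =>
    simp only [List.foldl_cons]
    rw [ih]
    simp only [List.length_cons, List.range_succ_eq_map, List.map_cons, List.map_map,
      List.take_succ_cons, List.sum_cons, List.map_nil, List.take_zero, List.sum_nil,
      List.getD_cons_zero, List.getD_cons_succ, Prod.mk.injEq]
    refine ⟨?_, by ring⟩
    rw [List.append_assoc]
    congr 1
    simp only [List.singleton_append, Function.comp_def]
    congr 1
    · ring
    · exact List.map_congr_left (fun k _ => by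
        rw [add_assoc r, List.getD_cons_succ])

-- max over a snoc
theorem pv_max?_snoc (l : List Int) (x m : Int)
    (h : PySem.List.max? l (fun y => y) = some m) :
    PySem.List.max? (l ++ [x]) (fun y => y) = some (max m x) := by
  cases l with
  | nil => simp [PySem.List.max?] at h
  | cons y t =>
    rw [PySem.List.max?_id_cons] at h
    rw [List.cons_append, PySem.List.max?_id_cons, List.foldl_append]
    simp at h
    simp [h]

-- fold-with-≥-update = max + last index of the max in the list (or 0 below the baseline)
theorem pv_bcore (sN : Nat → Int) (h0 : Int) (n : Nat) (hn : 1 ≤ n) :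
    ∃ (m : Int) (kk : Nat),
      PySem.List.max? ((List.range n).map sN) (fun y => y) = some m ∧
      PySem.List.index? (((List.range n).map sN).reverse) m = some kk ∧ kk < n ∧
      ((List.range n).foldl (fun (st : Int × Int) k =>
          if sN k ≥ st.1 then (sN k, (k:Int)) else st) (h0, 0)).1 = max h0 m ∧
      ((List.range n).foldl (fun (st : Int × Int) k =>
          if sN k ≥ st.1 then (sN k, (k:Int)) else st) (h0, 0)).2
        = if m < h0 then 0 else ((n:Int) - 1 - (kk:Int)) := by
  induction n, hn using Nat.le_induction with
  | base =>
    refine ⟨sN 0, 0, ?_, ?_, by omega, ?_, ?_⟩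
    · simp [PySem.List.max?_id_cons]
    · simp [List.range_one]
    · simp only [List.range_one, List.foldl_cons, List.foldl_nil]
      by_cases hx : sN 0 ≥ h0
      · rw [if_pos hx]; omega
      · rw [if_neg hx]; omega
    · simp only [List.range_one, List.foldl_cons, List.foldl_nil]
      by_cases hx : sN 0 ≥ h0
      · rw [if_pos hx, if_neg (by omega)]; simp
      · rw [if_neg hx, if_pos (by omega)]
  | succ n hn ih =>
    obtain ⟨m, kk, hmax, hidx, hkk, hfst, hsnd⟩ := ih
    set L := (List.range n).map sN with hL
    set F := (fun (st : Int × Int) k => if sN k ≥ st.1 then (sN k, (k:Int)) else st) with hF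
    have hrange : List.range (n+1) = List.range n ++ [n] := List.range_succ
    have hmap : (List.range (n+1)).map sN = L ++ [sN n] := by rw [hrange, List.map_append]; rfl
    have hfold : (List.range (n+1)).foldl F (h0, 0)
        = F ((List.range n).foldl F (h0, 0)) n := by
      rw [hrange, List.foldl_append]; rfl
    have hrev : (L ++ [sN n]).reverse = sN n :: L.reverse := by
      rw [List.reverse_append]; rfl
    have hmax' := pv_max?_snoc L (sN n) m hmax
    set st := (List.range n).foldl F (h0, 0) with hst
    by_cases hup : sN n ≥ st.1
    · -- update: new best is sN n at position n
      refine ⟨max m (sN n), 0, by rw [hmap]; exact hmax', ?_, by omega, ?_, ?_⟩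
      · rw [hmap, hrev]
        have : max m (sN n) = sN n := by rw [hfst] at hup; omega
        rw [this, PySem.List.index?_cons_self]
      · rw [hfold, hF]
        simp only [ge_iff_le, hup, if_pos]
        rw [hfst] at hup; omega
      · rw [hfold, hF]
        simp only [ge_iff_le, hup, if_pos]
        rw [hfst] at hup
        rw [if_neg (by omega)]
        have : max m (sN n) = sN n := by omega
        push_cast; omega
    · -- no update
      rw [hfst] at hup
      by_cases hm : h0 ≤ m
      · -- baseline already beaten: max stays m, last index shifts by one
        have hmx : max h0 m = m := by omega
        rw [hmx] at hup
        have hne : sN n ≠ m := by omega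
        have hmm : max m (sN n) = m := by omega
        refine ⟨m, kk + 1, by rw [hmap, hmax', hmm], ?_, by omega, ?_, ?_⟩
        · rw [hmap, hrev, PySem.List.index?_cons_of_ne _ (show sN n ≠ m by omega), hidx]; rfl
        · rw [hfold, hF]
          simp only [ge_iff_le]
          rw [if_neg (by rw [hfst, hmx]; omega), hfst, hmx]
        · rw [hfold, hF]
          simp only [ge_iff_le]
          rw [if_neg (by rw [hfst, hmx]; omega), hsnd, if_neg (by omega), if_neg (by omega)]
          push_cast; omega
      · -- still below the baseline: position stays 0
        have hmx : max h0 m = h0 := by omega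
        rw [hmx] at hup
        have hmem : max m (sN n) ∈ L ++ [sN n] := by
          rcases le_total (sN n) m with h | h
          · rw [max_eq_left h]
            exact List.mem_append_left _ (PySem.List.max?_mem hmax)
          · rw [max_eq_right h]; simp
        have hsome : (PySem.List.index? ((L ++ [sN n]).reverse) (max m (sN n))).isSome := by
          rw [PySem.List.index?_isSome_iff]
          exact List.mem_reverse.mpr hmem
        obtain ⟨kk', hkk'⟩ := Option.isSome_iff_exists.mp hsome
        have hbnd : kk' < n + 1 := by
          obtain ⟨hlt, _, _⟩ := PySem.List.getElem_of_index?_eq_some hkk'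
          simpa [hL] using hlt
        refine ⟨max m (sN n), kk', by rw [hmap, hmax'], by rw [hmap]; exact hkk', hbnd, ?_, ?_⟩
        · rw [hfold, hF]
          simp only [ge_iff_le]
          rw [if_neg (by rw [hfst, hmx]; omega), hfst, hmx]
          omega
        · rw [hfold, hF]
          simp only [ge_iff_le]
          rw [if_neg (by rw [hfst, hmx]; omega), hsnd, if_pos (by omega), if_pos (by omega)]

-- the two inner computations agree on overlap slices of equal length
theorem pv_core2 (A B C : List Char) (os : Int)
    (hB : B.length = A.length) (hC : C.length = A.length) (hn : 1 ≤ A.length) :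
    ((PySem.List.enumerate A).foldl
        (fun (st : Int × Int × Int) p =>
          let b1 := if PySem.List.pyGetD B p.1 ' ' == PySem.List.pyGetD C p.1 ' ' then st.1 - 1 else st.1
          let b2 := if p.2 == PySem.List.pyGetD C p.1 ' ' then b1 + 1 else b1
          if b2 ≥ st.2.1 then (b2, b2, p.1) else (b2, st.2.1, st.2.2))
        (pvBase B C, pvBase B C, 0)).2.2 + os
    = (let suffix0 := (B.reverse.zip C.reverse).foldl
          (fun (st : List Int × Int) p =>
            let run := st.2 + (if p.1 == p.2 then 1 else 0)
            (st.1 ++ [run], run)) ([0], 0)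
       let suffix := suffix0.1.reverse
       let total_b := PySem.List.pyGetD suffix 0 0
       let scores := (((A.zip C).zip (PySem.List.slice suffix (some 1) none)).foldl
          (fun (st : List Int × Int) p =>
            let running := st.2 + (if p.1.1 == p.1.2 then 1 else 0)
            (st.1 ++ [running + p.2], running)) ([], 0)).1
       match PySem.List.max? scores (fun y => y) with
       | none => 0
       | some best_score =>
         if best_score < total_b then os
         else
           match PySem.List.index? scores.reverse best_score with
           | some k => PySem.List.len scores - 1 - (k : Int) + os
           | none => 0) := by
  simp only []
  set n := A.length with hn'
  have hBClen : B.length = C.length := by omega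
  set mB := (B.zip C).map (fun p => p.1 == p.2) with hmB
  have hmBlen : mB.length = n := by simp [hmB, hB, hC]
  -- the suffix list is the reversed prefix table of B/C matches
  have hzrev : B.reverse.zip C.reverse = (B.zip C).reverse := by
    simp only [List.zip_eq_zipWith]
    exact (List.reverse_zipWith hBClen).symm
  have hsuffix0 : (B.reverse.zip C.reverse).foldl
      (fun (st : List Int × Int) p =>
        (st.1 ++ [st.2 + (if p.1 == p.2 then 1 else 0)], st.2 + (if p.1 == p.2 then 1 else 0))) ([0], 0)
      = ([0] ++ (List.range n).map
          (fun k => 0 + ((mB.reverse.take (k+1)).map (fun m => if m then (1:Int) else 0)).sum),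
         0 + (mB.reverse.map (fun m => if m then (1:Int) else 0)).sum) := by
    have hstep := (List.foldl_map (f := fun p : Char × Char => p.1 == p.2)
        (g := fun (st : List Int × Int) (m : Bool) =>
          (st.1 ++ [st.2 + (if m then 1 else 0)], st.2 + (if m then 1 else 0)))
        (l := (B.zip C).reverse) (init := ([0], 0)))
    rw [hzrev, ← hstep, List.map_reverse, ← hmB, pv_prefix_fold, List.length_reverse, hmBlen]
  have htake : ∀ s, s ≤ n → ((mB.take s).map (fun m => if m then (1:Int) else 0)).sum = pvCnt B C s := by
    intro s hs
    rw [hmB]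
    exact pv_match_take B C s (by omega) (by omega)
  have hall : (mB.map (fun m => if m then (1:Int) else 0)).sum = pvCnt B C n := by
    have h := htake n (le_refl n)
    rwa [List.take_of_length_le (by omega)] at h
  have hrevtake : ∀ k, k < n →
      ((mB.reverse.take (k+1)).map (fun m => if m then (1:Int) else 0)).sum
        = pvCnt B C n - pvCnt B C (n-(k+1)) := by
    intro k hk
    rw [List.take_reverse, List.map_reverse, List.sum_reverse, hmBlen]
    have hsplit := congrArg (fun l => (l.map (fun m => if m then (1:Int) else 0)).sum)
      (List.take_append_drop (n-(k+1)) mB)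
    simp only [List.map_append, List.sum_append] at hsplit
    have h1 := htake (n-(k+1)) (by omega)
    omega
  set g : Nat → Int := fun j => pvCnt B C n - pvCnt B C j with hg
  have hmapg : (List.range n).map
        (fun k => 0 + ((mB.reverse.take (k+1)).map (fun m => if m then (1:Int) else 0)).sum)
      = (List.range n).map (fun k => g (n-(k+1))) := by
    apply List.map_congr_left
    intro k hk
    rw [zero_add, hrevtake k (List.mem_range.mp hk), hg]
  have hsufflist : (([0] ++ (List.range n).map (fun k => g (n-(k+1)))) : List Int).reverse
      = (List.range (n+1)).map g := by
    apply List.ext_getElem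
    · simp
    · intro j hj1 hj2
      simp only [List.length_reverse, List.length_map, List.length_range,
        List.length_cons, List.singleton_append] at hj1 hj2 ⊢
      rw [List.getElem_reverse, List.getElem_map, List.getElem_range]
      simp only [List.length_cons, List.length_map, List.length_range]
      by_cases hjn : j < n
      · simp only [show n + 1 - 1 - j = (n - j - 1) + 1 from by omega,
          List.getElem_cons_succ, List.getElem_map, List.getElem_range]
        congr 1
        omega
      · have hj : j = n := by omega
        subst hj
        simp only [show n + 1 - 1 - n = 0 from by omega, List.getElem_cons_zero]
        rw [hg]
        simp
  -- the reversed suffix table, as a map over range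
  have hsufS : ((B.reverse.zip C.reverse).foldl
      (fun (st : List Int × Int) p =>
        (st.1 ++ [st.2 + (if p.1 == p.2 then 1 else 0)], st.2 + (if p.1 == p.2 then 1 else 0))) ([0], 0)).1.reverse
      = (List.range (n+1)).map g := by
    rw [hsuffix0]
    dsimp only
    rw [hmapg]
    exact hsufflist
  set S : List Int := (List.range (n+1)).map g with hS
  have hScons : S = g 0 :: (List.range n).map (fun i => g (i+1)) := by
    rw [hS, List.range_succ_eq_map, List.map_cons, List.map_map]
    simp [Function.comp_def]
  have hpv0 : pvCnt B C 0 = 0 := by simp [pvCnt]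
  have htotal : PySem.List.pyGetD S 0 0 = pvCnt B C n := by
    rw [hScons, show ((0:Int)) = ((0:Nat):Int) from rfl, PySem.List.pyGetD_natCast]
    simp [hg, hpv0]
  set tailS : List Int := (List.range n).map (fun i => g (i+1)) with htailS
  have htail : PySem.List.slice S (some 1) none = tailS := by
    rw [PySem.List.slice_from_one, hScons]
    rfl
  have hACl : (A.zip C).length = n := by simp [hC]; omega
  have hql : ((A.zip C).zip tailS).length = n := by simp [hACl, htailS]
  set sN : Nat → Int := fun k => 0 + pvCnt A C (k+1) + g (k+1) with hsN
  have hscores : (((A.zip C).zip tailS).foldl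
      (fun (st : List Int × Int) p =>
        (st.1 ++ [(st.2 + (if p.1.1 == p.1.2 then 1 else 0)) + p.2],
         st.2 + (if p.1.1 == p.1.2 then 1 else 0))) ([], 0)).1
      = (List.range n).map sN := by
    rw [pv_scores_fold]
    rw [hql, List.nil_append]
    apply List.map_congr_left
    intro k hk
    have hkn := List.mem_range.mp hk
    have h1 : ((A.zip C).zip tailS).take (k+1) = ((A.zip C).take (k+1)).zip (tailS.take (k+1)) := by
      simp [List.zip_eq_zipWith, List.take_zipWith]
    have h2 : (((A.zip C).take (k+1)).zip (tailS.take (k+1))).map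
          (fun p => if p.1.1 == p.1.2 then (1:Int) else 0)
        = (((A.zip C).take (k+1)).zip (tailS.take (k+1))).map
            ((fun pc : Char × Char => if pc.1 == pc.2 then (1:Int) else 0) ∘ Prod.fst) := rfl
    have h3 : ((A.zip C).take (k+1)).length ≤ (tailS.take (k+1)).length := by
      simp [hACl, htailS]
    have h4 : (((A.zip C).zip tailS).getD k ((' ',' '),0)).2 = g (k+1) := by
      have hk2 : k < ((A.zip C).zip tailS).length := by rw [hql]; omega
      rw [List.getD_eq_getElem?_getD, List.getElem?_eq_getElem hk2, List.getElem_zip]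
      simp [htailS]
    have hsum : ((List.take (k+1) (A.zip C)).map
          (fun pc : Char × Char => if pc.1 == pc.2 then (1:Int) else 0)).sum
        = pvCnt A C (k+1) := by
      have h6 := pv_match_take A C (k+1) (by omega) (by omega)
      rw [← List.map_take, List.map_map] at h6
      exact h6
    rw [h1, h2, ← List.map_map, List.map_fst_zip h3, h4, hsum, hsN]
  -- rewrite the B side of the goal into range-map form
  rw [hsufS, htotal, htail, hscores]
  -- A's loop: enumerate → indices, branch arithmetic folded into one additive step
  rw [PySem.List.enumerate_eq_map_pyRange A ' ', List.foldl_map, PySem.List.len_eq]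
  set stepF : Int → Int := fun j =>
    (if PySem.List.pyGetD A j ' ' == PySem.List.pyGetD C j ' ' then (1:Int) else 0)
      - (if PySem.List.pyGetD B j ' ' == PySem.List.pyGetD C j ' ' then (1:Int) else 0) with hstepF
  set scZ : Int → Int := fun j => sN j.toNat with hscZ
  have hbody : (PySem.List.pyRange 0 ((n : Nat) : Int) 1).foldl
      (fun (st : Int × Int × Int) j =>
        let b1 := if PySem.List.pyGetD B j ' ' == PySem.List.pyGetD C j ' ' then st.1 - 1 else st.1
        let b2 := if PySem.List.pyGetD A j ' ' == PySem.List.pyGetD C j ' ' then b1 + 1 else b1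
        if b2 ≥ st.2.1 then (b2, b2, j) else (b2, st.2.1, st.2.2))
      (pvBase B C, pvBase B C, 0)
      = (PySem.List.pyRange 0 ((n : Nat) : Int) 1).foldl
      (fun (st : Int × Int × Int) j =>
        let b2 := st.1 + stepF j
        if b2 ≥ st.2.1 then (b2, b2, j) else (b2, st.2.1, st.2.2))
      (pvBase B C, pvBase B C, 0) := by
    apply PySem.List.foldl_congr_mem
    intro st j _
    dsimp only
    rw [pv_step_arith]
  rw [hbody]
  have hbase : pvBase B C = pvCnt B C n := by rw [pv_base_eq, hB]
  have hsc : ∀ pre j post, PySem.List.pyRange 0 ((n : Nat) : Int) 1 = pre ++ j :: post →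
      scZ j = pvBase B C + ((pre ++ [j]).map stepF).sum := by
    intro pre j post hdec
    have hlen0 : (PySem.List.pyRange 0 ((n : Nat) : Int) 1).length = n := by
      rw [PySem.List.length_pyRange_one]; omega
    set k := pre.length with hkdef
    have hklen : k < n := by
      have := congrArg List.length hdec
      rw [hlen0] at this
      simp at this
      omega
    have hjval : j = (k : Int) := by
      have h1 : (PySem.List.pyRange 0 ((n : Nat) : Int) 1)[k]? = some j := by
        rw [hdec, List.getElem?_append_right (le_refl _)]
        simp
      rw [List.getElem?_eq_getElem (by omega)] at h1
      rw [PySem.List.getElem_pyRange_one] at h1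
      have := Option.some_injective _ h1
      omega
    have hlenpre : (PySem.List.pyRange 0 ((k : Nat) : Int) 1).length = k := by
      rw [PySem.List.length_pyRange_one]; omega
    have hpre : pre = PySem.List.pyRange 0 ((k : Nat) : Int) 1 := by
      have hsplit := PySem.List.pyRange_one_append 0 ((k : Nat) : Int)
        ((n : Nat) : Int) (by omega) (by omega)
      rw [hsplit] at hdec
      exact (List.append_inj hdec.symm hlenpre.symm).1
    have hcast : ((k : Int) + 1) = (((k + 1 : Nat)) : Int) := by push_cast; ring
    have hsum : ((pre ++ [j]).map stepF).sum = pvCnt A C (k + 1) - pvCnt B C (k + 1) := by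
      rw [hjval, hpre, ← PySem.List.pyRange_one_succ_right (by omega), hcast, hstepF]
      exact pv_range_step A B C (k + 1)
    rw [hscZ]
    dsimp only
    rw [hsum, hjval, Int.toNat_natCast, hsN, hbase, hg]
    dsimp only
    ring
  rw [pv_foldl_track _ stepF scZ (pvBase B C) (pvBase B C) 0 hsc]
  dsimp only
  -- the index loop, moved from python range to List.range
  rw [PySem.List.pyRange_one, show (((n : Nat) : Int) - 0).toNat = n from by omega,
    List.foldl_map]
  have hfun : (fun (st : Int × Int) (k : Nat) =>
        if scZ ((0:Int) + (k : Int)) ≥ st.1 then (scZ ((0:Int) + (k : Int)), (0:Int) + (k : Int)) else st)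
      = (fun (st : Int × Int) (k : Nat) => if sN k ≥ st.1 then (sN k, (k : Int)) else st) := by
    funext st k
    simp [hscZ]
  rw [hfun, hbase]
  obtain ⟨m, kk, hmax, hidx, hkk, hfst, hsnd⟩ := pv_bcore sN (pvCnt B C n) n hn
  rw [hmax]
  dsimp only
  rw [hsnd]
  by_cases hlt : m < pvCnt B C n
  · rw [if_pos hlt, if_pos hlt]
    simp
  · rw [if_neg hlt, if_neg hlt, hidx]
    dsimp only
    rw [PySem.List.len_eq]
    simp


-- B's lstrip/rstrip arithmetic gives the same first/last non-dash indices
theorem pv_lstrip_len (cs : List Char) :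
    (PySem.List.len cs : Int) - PySem.List.len (cs.dropWhile (· == '-'))
      = ((pvFND cs : Nat) : Int) := by
  have hsplit := congrArg List.length (List.takeWhile_append_dropWhile (p := (· == '-')) (l := cs))
  rw [List.length_append] at hsplit
  rw [PySem.List.len_eq, PySem.List.len_eq, pvFND]
  omega

theorem pv_rstrip_len (cs : List Char) (h : cs.any (· != '-') = true) :
    (PySem.List.len ((cs.reverse.dropWhile (· == '-')).reverse) : Int) - 1
      = ((pvLND cs : Nat) : Int) := by
  have hsplit := congrArg List.length
    (List.takeWhile_append_dropWhile (p := (· == '-')) (l := cs.reverse))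
  rw [List.length_append] at hsplit
  rw [List.length_reverse] at hsplit
  have hlt := pv_tw_rev_lt cs h
  rw [PySem.List.len_eq, List.length_reverse, pvLND]
  omega

-- ===== VERDICT (by name: the statement is the Claim_ definition above) =====
set_option maxHeartbeats 1000000 in
theorem calculate_split_spec : Claim_equal_calculate_split := by
  intro a b c _ hpre
  obtain ⟨ha, hb, hov, hc⟩ := hpre
  unfold Spec_calculate_split
  have hlena : 1 ≤ a.toList.length := by
    cases h : a.toList with
    | nil => rw [h] at ha; simp at ha
    | cons x t => simp
  have hlenb : 1 ≤ b.toList.length := by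
    cases h : b.toList with
    | nil => rw [h] at hb; simp at hb
    | cons x t => simp
  -- A's helper values
  have hga : pvGetStartEnd a = (some ((pvFND a.toList : Nat) : Int), some ((pvLND a.toList : Nat) : Int)) := by
    simp only [pvGetStartEnd, PySem.List.len_eq]
    rw [pv_find_last _ ha, pv_find_first a.toList 0 ha]
    norm_num
  have hgb : pvGetStartEnd b = (some ((pvFND b.toList : Nat) : Int), some ((pvLND b.toList : Nat) : Int)) := by
    simp only [pvGetStartEnd, PySem.List.len_eq]
    rw [pv_find_last _ hb, pv_find_first b.toList 0 hb]
    norm_num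
  -- overlap bounds as naturals
  set OS : Nat := max (pvFND a.toList) (pvFND b.toList) with hOS
  set OE : Nat := min (pvLND a.toList) (pvLND b.toList) with hOE
  have hmaxc : max ((pvFND a.toList : Nat) : Int) ((pvFND b.toList : Nat) : Int) = ((OS : Nat) : Int) := by
    rw [hOS]; push_cast; rfl
  have hminc : min ((pvLND a.toList : Nat) : Int) ((pvLND b.toList : Nat) : Int) = ((OE : Nat) : Int) := by
    rw [hOE]; push_cast; rfl
  have hfo : pvFindOverlap (((pvFND a.toList : Nat) : Int), ((pvLND a.toList : Nat) : Int))
      (((pvFND b.toList : Nat) : Int), ((pvLND b.toList : Nat) : Int))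
      = some (((OS : Nat) : Int), ((OE : Nat) : Int)) := by
    simp only [pvFindOverlap]
    rw [hmaxc, hminc, if_neg (by omega)]
  -- bounds on the overlap inside each string
  have hOEa : OE < a.toList.length := by
    have := pv_tw_rev_lt a.toList ha
    simp only [pvLND] at hOE
    omega
  have hOEb : OE < b.toList.length := by
    have := pv_tw_rev_lt b.toList hb
    simp only [pvLND] at hOE
    omega
  have hOEc : OE < c.toList.length := hc
  have hcast1 : ((OE : Nat) : Int) + 1 = (((OE + 1 : Nat)) : Int) := by push_cast; ring
  have hslicelen : ∀ (cs : List Char), OE < cs.length →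
      (PySem.List.slice cs (some ((OS : Nat) : Int)) (some (((OE + 1 : Nat)) : Int))).length
        = OE + 1 - OS := by
    intro cs hlt
    rw [PySem.List.slice_natCast]
    simp only [List.length_take, List.length_drop]
    omega
  -- reduce A to the overlap computation
  unfold calculate_split
  rw [hga, hgb]
  dsimp only
  rw [hfo]
  dsimp only
  -- reduce B's bounds to the same naturals
  unfold calculate_split_alt
  rw [pv_lstrip_len a.toList, pv_lstrip_len b.toList,
    pv_rstrip_len a.toList ha, pv_rstrip_len b.toList hb]
  dsimp only
  rw [hmaxc, hminc, hcast1]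
  set aov := PySem.List.slice a.toList (some ((OS : Nat) : Int)) (some (((OE + 1 : Nat)) : Int)) with haov
  set bov := PySem.List.slice b.toList (some ((OS : Nat) : Int)) (some (((OE + 1 : Nat)) : Int)) with hbov
  set cov := PySem.List.slice c.toList (some ((OS : Nat) : Int)) (some (((OE + 1 : Nat)) : Int)) with hcov
  have hBlen : bov.length = aov.length := by
    rw [haov, hbov, hslicelen _ hOEa, hslicelen _ hOEb]
  have hClen : cov.length = aov.length := by
    rw [haov, hcov, hslicelen _ hOEa, hslicelen _ hOEc]
  have hn1 : 1 ≤ aov.length := by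
    rw [haov, hslicelen _ hOEa]
    omega
  have h := pv_core2 aov bov cov ((OS : Nat) : Int) hBlen hClen hn1
  unfold pvBase at h
  simp only [] at h
  exact h
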